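-- pv_equiv track=rewrite | github.com/cmpsc24/Project-2 | main.py | find_closest_resources
-- ===== SOURCE A (Python) =====
-- def simple_distance(lat1, lon1, lat2, lon2):
--     return abs(lat2 - lat1) + abs(lon2 - lon1)
--
-- def find_closest_resources(hurricane_position, shelters, evacuation_points):
--     shelter_distances = {}
--     for shelter, location in shelters.items():
--         shelter_distances[shelter] = simple_distance(hurricane_position[0], hurricane_position[1], location[0], location[1])
--
--     evacuation_distances = {}
--     for point, location in evacuation_points.items():
--         evacuation_distances[point] = simple_distance(hurricane_position[0], hurricane_position[1], location[0], location[1])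
--
--     # Sort the dictionaries based on distance and get the closest 2 shelters and evacuation points
--     closest_shelters = sorted(shelter_distances.items(), key=lambda x: x[1])[:2]  # Top 2 closest shelters
--     closest_evacuations = sorted(evacuation_distances.items(), key=lambda x: x[1])[:2]  # Top 2 closest evacuation points
--
--     return closest_shelters, closest_evacuations
-- ===== SOURCE B (Python) =====
-- def find_closest_resources(hurricane_position, shelters, evacuation_points):
--     hx, hy = hurricane_position[0], hurricane_position[1]
--
--     def closest_two(points):
--         # one pass keeping at most the two nearest (name, distance) pairs;
--         # strict '<' preserves first-seen order on ties, like sorted()'s stability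
--         best = []
--         for name, loc in points.items():
--             d = abs(loc[0] - hx) + abs(loc[1] - hy)
--             if len(best) == 0:
--                 best = [(name, d)]
--             elif len(best) == 1:
--                 a = best[0]
--                 best = [(name, d), a] if d < a[1] else [a, (name, d)]
--             else:
--                 a, b = best
--                 if d < a[1]:
--                     best = [(name, d), a]
--                 elif d < b[1]:
--                     best = [a, (name, d)]
--         return best
--
--     return closest_two(shelters), closest_two(evacuation_points)
-- ===== Notes on version B (the rewrite author's own statement) =====
-- stated objective: alternative
-- what changed: Replaces build-a-distance-dict-then-sorted()[:2] by a single linear pass per dict that maintains the two smallest (name, distance) pairs, with strict '<' reproducing sorted()'s stable tie-breaking; Pre_ excludes positions/locations with fewer than 2 coordinates (A raises IndexError whenever a dict is non-empty, and B, which reads the position up front, raises even with both dicts empty) and duplicate keys, unrepresentable in a Python dict.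
-- outside the precondition, e.g. on find_closest_resources([], {}, {}): A returns ([], []), B raises IndexError
import Mathlib
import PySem

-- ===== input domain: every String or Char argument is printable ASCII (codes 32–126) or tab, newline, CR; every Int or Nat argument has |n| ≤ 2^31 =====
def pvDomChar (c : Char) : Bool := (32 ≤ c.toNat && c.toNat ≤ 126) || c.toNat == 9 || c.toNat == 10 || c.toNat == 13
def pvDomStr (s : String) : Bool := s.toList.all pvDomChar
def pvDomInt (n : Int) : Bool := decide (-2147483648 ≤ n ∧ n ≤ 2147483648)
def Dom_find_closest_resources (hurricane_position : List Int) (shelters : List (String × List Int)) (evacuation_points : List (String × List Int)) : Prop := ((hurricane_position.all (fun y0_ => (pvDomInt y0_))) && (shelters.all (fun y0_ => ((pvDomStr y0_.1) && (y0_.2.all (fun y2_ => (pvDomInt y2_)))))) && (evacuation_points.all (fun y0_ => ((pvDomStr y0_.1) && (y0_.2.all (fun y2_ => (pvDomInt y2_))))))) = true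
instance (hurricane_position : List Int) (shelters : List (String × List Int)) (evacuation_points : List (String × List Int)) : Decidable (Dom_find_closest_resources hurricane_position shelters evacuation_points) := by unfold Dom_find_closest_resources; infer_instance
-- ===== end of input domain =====

-- ===== PORT A =====
-- B replaces A's dict-building + stable sort + [:2] slice by one linear pass per dict
-- keeping the two nearest (name, distance) pairs (objective: alternative single-pass top-2 selection).
def simple_distance (lat1 lon1 lat2 lon2 : Int) : Int :=
  |lat2 - lat1| + |lon2 - lon1|

def pvDistDict (hx hy : Int) (points : List (String × List Int)) : PySem.Dict String Int :=
  points.foldl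
    (fun d kv => d.insert kv.1 (simple_distance hx hy (PySem.List.pyGetD kv.2 0 0) (PySem.List.pyGetD kv.2 1 0)))
    PySem.Dict.empty

def find_closest_resources (hurricane_position : List Int) (shelters : List (String × List Int)) (evacuation_points : List (String × List Int)) : (List (String × Int)) × (List (String × Int)) :=
  let hx := PySem.List.pyGetD hurricane_position 0 0
  let hy := PySem.List.pyGetD hurricane_position 1 0
  let shelter_distances := pvDistDict hx hy shelters
  let evacuation_distances := pvDistDict hx hy evacuation_points
  let closest_shelters := PySem.List.slice (PySem.List.sorted shelter_distances.items (fun x => x.2) false) none (some 2)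
  let closest_evacuations := PySem.List.slice (PySem.List.sorted evacuation_distances.items (fun x => x.2) false) none (some 2)
  (closest_shelters, closest_evacuations)

-- ===== PORT B =====
def pvStep (best : List (String × Int)) (p : String × Int) : List (String × Int) :=
  match best with
  | [] => [p]
  | [a] => if p.2 < a.2 then [p, a] else [a, p]
  | a :: b :: _ => if p.2 < a.2 then [p, a] else if p.2 < b.2 then [a, p] else [a, b]

def pvClosestTwo (hx hy : Int) (points : List (String × List Int)) : List (String × Int) :=
  points.foldl
    (fun best kv =>
      pvStep best (kv.1, |PySem.List.pyGetD kv.2 0 0 - hx| + |PySem.List.pyGetD kv.2 1 0 - hy|))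
    []

def find_closest_resources_alt (hurricane_position : List Int) (shelters : List (String × List Int)) (evacuation_points : List (String × List Int)) : (List (String × Int)) × (List (String × Int)) :=
  let hx := PySem.List.pyGetD hurricane_position 0 0
  let hy := PySem.List.pyGetD hurricane_position 1 0
  (pvClosestTwo hx hy shelters, pvClosestTwo hx hy evacuation_points)

-- ===== PRECONDITION & SPEC =====
-- Pre_ excludes positions/locations with fewer than 2 coordinates (A raises IndexError
-- whenever a dict is non-empty, and B, which reads the position up front, raises even with
-- both dicts empty) and duplicate keys, unrepresentable in a Python dict.
def Pre_find_closest_resources (hurricane_position : List Int) (shelters : List (String × List Int)) (evacuation_points : List (String × List Int)) : Prop :=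
  2 ≤ hurricane_position.length ∧
  (∀ kv ∈ shelters, 2 ≤ kv.2.length) ∧ (∀ kv ∈ evacuation_points, 2 ≤ kv.2.length) ∧
  (shelters.map (fun kv => kv.1)).Nodup ∧ (evacuation_points.map (fun kv => kv.1)).Nodup
instance (hurricane_position : List Int) (shelters : List (String × List Int)) (evacuation_points : List (String × List Int)) : Decidable (Pre_find_closest_resources hurricane_position shelters evacuation_points) := by unfold Pre_find_closest_resources; infer_instance

def pvWitness_find_closest_resources : List Int × (List (String × List Int)) × (List (String × List Int)) :=
  ([0, 0], [("a", [1, 2]), ("b", [3, 4]), ("c", [0, 1])], [("e", [5, 5])])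

def Spec_find_closest_resources (hurricane_position : List Int) (shelters : List (String × List Int)) (evacuation_points : List (String × List Int)) (out : (List (String × Int)) × (List (String × Int))) : Prop := out = find_closest_resources_alt hurricane_position shelters evacuation_points
instance (hurricane_position : List Int) (shelters : List (String × List Int)) (evacuation_points : List (String × List Int)) (out : (List (String × Int)) × (List (String × Int))) : Decidable (Spec_find_closest_resources hurricane_position shelters evacuation_points out) := by unfold Spec_find_closest_resources; infer_instance

-- ===== CLAIM (what is proved, stated in full; the proofs are below) =====
def Claim_equal_find_closest_resources : Prop := ∀ (hurricane_position : List Int) (shelters : List (String × List Int)) (evacuation_points : List (String × List Int)), Dom_find_closest_resources hurricane_position shelters evacuation_points → Pre_find_closest_resources hurricane_position shelters evacuation_points → Spec_find_closest_resources hurricane_position shelters evacuation_points (find_closest_resources hurricane_position shelters evacuation_points)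

-- ===== LEMMAS AND PROOFS =====

-- the distance dict over distinct fresh keys is just a map over the input pairs
lemma items_pvDistDict (hx hy : Int) (points : List (String × List Int))
    (h : (points.map (fun kv => kv.1)).Nodup) :
    (pvDistDict hx hy points).items
      = points.map (fun kv => (kv.1, simple_distance hx hy (PySem.List.pyGetD kv.2 0 0) (PySem.List.pyGetD kv.2 1 0))) := by
  unfold pvDistDict
  rw [PySem.Dict.items_foldl_insert_fresh]
  · rfl
  · intro a _; simp [PySem.Dict.contains_empty]
  · exact h

-- first two of an insertion depend only on the first two of the list, exactly as pvStep
lemma take2_insertBy (s : List (String × Int)) (x : String × Int) :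
    (PySem.List.insertBy (fun a b => decide (a.2 < b.2)) x s).take 2 = pvStep (s.take 2) x := by
  match s with
  | [] => simp [PySem.List.insertBy, pvStep]
  | [a] =>
    simp only [PySem.List.insertBy, pvStep]
    split_ifs <;> simp_all
  | a :: b :: t =>
    by_cases h1 : x.2 < a.2
    · simp [PySem.List.insertBy, pvStep, h1]
    · by_cases h2 : x.2 < b.2
      · simp [PySem.List.insertBy, pvStep, h1, h2]
      · simp [PySem.List.insertBy, pvStep, h1, h2]

lemma foldl_insertBy_take2 (l : List (String × Int)) (s : List (String × Int)) :
    (l.foldl (fun acc x => PySem.List.insertBy (fun a b => decide (a.2 < b.2)) x acc) s).take 2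
      = l.foldl pvStep (s.take 2) := by
  induction l generalizing s with
  | nil => rfl
  | cons x l ih => simp only [List.foldl_cons, ih, take2_insertBy]

lemma take2_sorted (l : List (String × Int)) :
    (PySem.List.sorted l (fun x => x.2) false).take 2 = l.foldl pvStep [] := by
  rw [PySem.List.sorted_eq_foldl_insertBy]
  exact foldl_insertBy_take2 l []

lemma side_eq (hx hy : Int) (points : List (String × List Int))
    (h : (points.map (fun kv => kv.1)).Nodup) :
    PySem.List.slice (PySem.List.sorted (pvDistDict hx hy points).items (fun x => x.2) false) none (some 2)
      = pvClosestTwo hx hy points := by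
  have hsl : ∀ xs : List (String × Int), PySem.List.slice xs none (some 2) = xs.take 2 := by
    intro xs; simp [pysem]
  rw [hsl]
  rw [items_pvDistDict hx hy points h, take2_sorted, List.foldl_map]
  unfold pvClosestTwo
  simp [simple_distance]

-- ===== VERDICT (by name: the statement is the Claim_ definition above) =====
theorem find_closest_resources_spec : Claim_equal_find_closest_resources := by
  intro hp sh ev _ hpre
  obtain ⟨-, -, -, hsh, hev⟩ := hpre
  unfold Spec_find_closest_resources find_closest_resources find_closest_resources_alt
  simp only [side_eq _ _ _ hsh, side_eq _ _ _ hev]
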